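-- pv_equiv track=rewrite | github.com/mathbeveridge/asm | aztec/general_comb.py | to_omega_row
-- ===== SOURCE A (Python) =====
-- def to_omega_row(b_row, d_row):
--     row = []
--     height = 0
--
--     for b,d in zip(reversed(b_row), reversed(d_row)):
--         height = height + d
--         val = (-1)**(b+1)  *  height
--         row.insert(0, val)
--         if b == 1:
--             height = height + 1
--
--     size = len(b_row)
--     if abs(row[0]) < size:
--         row[0] = abs(row[0])
--
--     return row
-- ===== SOURCE B (Python) =====
-- def to_omega_row(b_row, d_row):
--     # Closed form: for each index k of the zipped tail, the value is
--     # (-1)**(bs[k]+1) * (sum(ds[k:]) + count of 1s in bs[k+1:]),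
--     # computed via forward prefix sums instead of A's running recurrence.
--     n = min(len(b_row), len(d_row))
--     bs = b_row[len(b_row) - n:]
--     ds = d_row[len(d_row) - n:]
--     sd = [0] * (n + 1)   # sd[k] = sum of first k elements of ds
--     c1 = [0] * (n + 1)   # c1[k] = number of 1s among first k elements of bs
--     for i in range(n):
--         sd[i + 1] = sd[i] + ds[i]
--         c1[i + 1] = c1[i] + (1 if bs[i] == 1 else 0)
--     row = [(-1) ** (bs[k] + 1) * (sd[n] - sd[k] + c1[n] - c1[k + 1])
--            for k in range(n)]
--     if abs(row[0]) < len(b_row):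
--         row[0] = abs(row[0])
--     return row
-- ===== Notes on version B (the rewrite author's own statement) =====
-- stated objective: faster
-- what changed: A computes each value from a running height updated element by element in a right-to-left pass with insert(0) (quadratic shifting); B uses the closed form row[k] = (-1)**(bs[k]+1) * (sum(ds[k:]) + count of 1s in bs[k+1:]), evaluated with two forward prefix-sum tables and a forward comprehension, with no running recurrence and no reversal.
-- outside the precondition, e.g. on to_omega_row([-2], [3]): A returns [-3.0], B returns [-3.0]; on to_omega_row([], []): A raises IndexError, B raises IndexError
import Mathlib
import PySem

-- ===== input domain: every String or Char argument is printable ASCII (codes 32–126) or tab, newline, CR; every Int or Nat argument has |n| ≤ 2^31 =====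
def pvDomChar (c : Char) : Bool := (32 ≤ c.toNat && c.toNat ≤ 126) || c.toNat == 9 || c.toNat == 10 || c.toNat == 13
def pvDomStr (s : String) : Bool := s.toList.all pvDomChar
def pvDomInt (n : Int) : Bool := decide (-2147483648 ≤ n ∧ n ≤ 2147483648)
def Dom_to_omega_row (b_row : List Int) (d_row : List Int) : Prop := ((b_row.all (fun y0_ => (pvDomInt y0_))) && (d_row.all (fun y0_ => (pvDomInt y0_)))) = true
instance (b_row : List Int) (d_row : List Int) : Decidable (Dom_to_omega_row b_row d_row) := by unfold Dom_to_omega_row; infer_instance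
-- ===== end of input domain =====

-- B replaces A's right-to-left running-height recurrence with insert(0) by the closed
-- form row[k] = (-1)**(bs[k]+1) * (sum(ds[k:]) + #1s in bs[k+1:]), evaluated with two
-- forward prefix-sum tables; objective: faster (no per-step list shifting, no recurrence).

-- ===== PORT A =====
-- one loop step of A: height += d; val = (-1)**(b+1) * height; row.insert(0, val); if b == 1: height += 1
-- ((-1)**(b+1) ported as (-1)^(b+1).toNat: exact for b ≥ -1; for b ≤ -2 Python yields a float — excluded by Pre_)
def pvStepA (st : List Int × Int) (bd : Int × Int) : List Int × Int :=
  let height := st.2 + bd.2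
  let val := (-1 : Int) ^ (bd.1 + 1).toNat * height
  (val :: st.1, if bd.1 == 1 then height + 1 else height)

def to_omega_row (b_row : List Int) (d_row : List Int) : List Int :=
  let st := (List.zip b_row.reverse d_row.reverse).foldl pvStepA ([], 0)
  -- size = len(b_row); if abs(row[0]) < size: row[0] = abs(row[0])   (row[0] on [] raises IndexError: outside Pre_)
  match st.1 with
  | [] => []
  | r0 :: rest => if |r0| < (b_row.length : Int) then |r0| :: rest else r0 :: rest

-- ===== PORT B =====
-- the prefix-table loop of Source B: sd[i+1] = sd[i] + ds[i] (resp. c1 with the 1-indicator),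
-- transcribed as a scan producing the length-(n+1) table [0, f x0, f x0 + f x1, …]
def pvScan (f : Int → Int) : List Int → Int → List Int
  | [], acc => [acc]
  | x :: t, acc => acc :: pvScan f t (acc + f x)

def to_omega_row_alt (b_row : List Int) (d_row : List Int) : List Int :=
  let n := min b_row.length d_row.length
  let bs := b_row.drop (b_row.length - n)
  let ds := d_row.drop (d_row.length - n)
  let sd := pvScan (fun x => x) ds 0
  let c1 := pvScan (fun b => if b == 1 then 1 else 0) bs 0
  -- row = [(-1)**(bs[k]+1) * (sd[n]-sd[k] + c1[n]-c1[k+1]) for k in range(n)]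
  -- (list indexing ported with getD 0: every index used is in range; same ** port as A)
  let row := (List.range n).map (fun k =>
    (-1 : Int) ^ ((bs.getD k 0) + 1).toNat *
      (sd.getD n 0 - sd.getD k 0 + c1.getD n 0 - c1.getD (k + 1) 0))
  -- if abs(row[0]) < len(b_row): row[0] = abs(row[0])   (row[0] on [] raises IndexError: outside Pre_)
  match row with
  | [] => []
  | r0 :: rest => if |r0| < (b_row.length : Int) then |r0| :: rest else r0 :: rest

-- ===== PRECONDITION & SPEC =====
-- Pre_ excludes (a) inputs where either list is empty, on which A raises IndexError at row[0],
-- and (b) inputs where some b in the zipped tail of b_row is ≤ -2, on which (-1)**(b+1) is a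
-- Python float so A returns floats, not a list of ints (B behaves identically on both).
def Pre_to_omega_row (b_row : List Int) (d_row : List Int) : Prop :=
  b_row ≠ [] ∧ d_row ≠ [] ∧ ∀ b ∈ b_row.reverse.take d_row.length, -1 ≤ b
instance (b_row : List Int) (d_row : List Int) : Decidable (Pre_to_omega_row b_row d_row) := by
  unfold Pre_to_omega_row; infer_instance

def pvWitness_to_omega_row : List Int × List Int := ([1, 0, 2], [1, -2, 3])

def Spec_to_omega_row (b_row : List Int) (d_row : List Int) (out : List Int) : Prop := out = to_omega_row_alt b_row d_row
instance (b_row : List Int) (d_row : List Int) (out : List Int) : Decidable (Spec_to_omega_row b_row d_row out) := by unfold Spec_to_omega_row; infer_instance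

-- ===== CLAIM (what is proved, stated in full; the proofs are below) =====
def Claim_equal_to_omega_row : Prop := ∀ (b_row : List Int) (d_row : List Int), Dom_to_omega_row b_row d_row → Pre_to_omega_row b_row d_row → Spec_to_omega_row b_row d_row (to_omega_row b_row d_row)

-- ===== LEMMAS AND PROOFS =====

-- final height after processing a list of (b, d) pairs starting from h
def pvFinalH : List (Int × Int) → Int → Int
  | [], h => h
  | (b, d) :: t, h => pvFinalH t (if b == 1 then h + d + 1 else h + d)

-- the signed values A computes, in iteration order
def pvVals : List (Int × Int) → Int → List Int
  | [], _ => []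
  | (b, d) :: t, h =>
      ((-1 : Int) ^ (b + 1).toNat * (h + d)) :: pvVals t (if b == 1 then h + d + 1 else h + d)

theorem pvFoldA (ps : List (Int × Int)) : ∀ (acc : List Int) (h : Int),
    ps.foldl pvStepA (acc, h) = ((pvVals ps h).reverse ++ acc, pvFinalH ps h) := by
  induction ps with
  | nil => intro acc h; simp [pvVals, pvFinalH]
  | cons p t ih =>
      intro acc h
      obtain ⟨b, d⟩ := p
      simp [List.foldl, pvStepA, pvVals, pvFinalH, ih]

-- A's values in iteration order, in closed form: element i is
-- sign(bs[i]) * (h + sum of the first i+1 d's + number of 1s among the first i b's)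
theorem pvValsA_closed (bs : List Int) : ∀ (ds : List Int) (h : Int), bs.length = ds.length →
    pvVals (bs.zip ds) h = (List.range bs.length).map (fun i =>
      (-1 : Int) ^ ((bs.getD i 0) + 1).toNat *
        (h + (ds.take (i + 1)).sum + (((bs.take i).countP (fun x => x == 1) : Int)))) := by
  induction bs with
  | nil => intro ds h _; simp [pvVals]
  | cons b bt ih =>
      intro ds h hlen
      cases ds with
      | nil => simp at hlen
      | cons d dt =>
        simp only [List.length_cons] at hlen
        simp only [List.zip_cons_cons, pvVals, List.length_cons,
          List.range_succ_eq_map, List.map_cons, List.map_map]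
        congr 1
        · simp
        · rw [ih dt _ (by omega)]
          apply List.map_congr_left
          intro i _
          simp only [Function.comp, List.getD_cons_succ, List.take_succ_cons,
            List.countP_cons]
          by_cases hb : b = 1
          · subst hb; simp; ring_nf
          · have hb' : (b == 1) = false := by simpa using hb
            simp [hb']
            ring_nf

theorem pvScan_getD (f : Int → Int) (xs : List Int) : ∀ (acc : Int) (k : Nat), k ≤ xs.length →
    (pvScan f xs acc).getD k 0 = acc + ((xs.take k).map f).sum := by
  induction xs with
  | nil =>
      intro acc k hk
      have hk0 : k = 0 := Nat.le_zero.mp hk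
      subst hk0
      simp [pvScan]
  | cons x t ih =>
      intro acc k hk
      cases k with
      | zero => simp [pvScan]
      | succ j =>
          simp only [pvScan, List.getD_cons_succ, List.take_succ_cons, List.map_cons,
            List.sum_cons]
          rw [ih (acc + f x) j (by simpa using hk)]
          ring

theorem pvIndSum (xs : List Int) :
    ((xs.map (fun b => if b == 1 then (1 : Int) else 0)).sum) = (xs.countP (fun x => x == 1) : Int) := by
  induction xs with
  | nil => simp
  | cons x t ih =>
      simp only [List.map_cons, List.sum_cons, List.countP_cons, ih]
      by_cases hx : (x == 1) = true
      · simp [hx]; ring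
      · simp [hx]

theorem pvZipTakeMin (xs ys : List Int) :
    xs.zip ys = (xs.take (min xs.length ys.length)).zip (ys.take (min xs.length ys.length)) := by
  induction xs generalizing ys with
  | nil => simp
  | cons a t ih =>
      cases ys with
      | nil => simp
      | cons b u => simp [List.zip_cons_cons, Nat.succ_min_succ, ih u]

theorem pvSumSplit (xs : List Int) (k : Nat) : xs.sum = (xs.take k).sum + (xs.drop k).sum := by
  conv_lhs => rw [← List.take_append_drop k xs]
  rw [List.sum_append]

theorem pvCountSplit (xs : List Int) (k : Nat) (p : Int → Bool) :
    xs.countP p = (xs.take k).countP p + (xs.drop k).countP p := by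
  conv_lhs => rw [← List.take_append_drop k xs]
  rw [List.countP_append]

-- the two pre-adjustment rows coincide
theorem pvRows_eq (b_row d_row : List Int) :
    ((pvVals (List.zip b_row.reverse d_row.reverse) 0).reverse) =
      (List.range (min b_row.length d_row.length)).map (fun k =>
        (-1 : Int) ^ (((b_row.drop (b_row.length - min b_row.length d_row.length)).getD k 0) + 1).toNat *
          ((pvScan (fun x => x) (d_row.drop (d_row.length - min b_row.length d_row.length)) 0).getD (min b_row.length d_row.length) 0
            - (pvScan (fun x => x) (d_row.drop (d_row.length - min b_row.length d_row.length)) 0).getD k 0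
            + (pvScan (fun b => if b == 1 then 1 else 0) (b_row.drop (b_row.length - min b_row.length d_row.length)) 0).getD (min b_row.length d_row.length) 0
            - (pvScan (fun b => if b == 1 then 1 else 0) (b_row.drop (b_row.length - min b_row.length d_row.length)) 0).getD (k + 1) 0)) := by
  set n := min b_row.length d_row.length with hn
  set bs := b_row.drop (b_row.length - n) with hbs
  set ds := d_row.drop (d_row.length - n) with hds
  have hbsl : bs.length = n := by rw [hbs]; simp [hn]; omega
  have hdsl : ds.length = n := by rw [hds]; simp [hn]; omega
  have hbr : b_row.reverse.take n = bs.reverse := by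
    rw [hbs, ← List.take_reverse]
  have hdr : d_row.reverse.take n = ds.reverse := by
    rw [hds, ← List.take_reverse]
  have hzip : List.zip b_row.reverse d_row.reverse = bs.reverse.zip ds.reverse := by
    rw [pvZipTakeMin b_row.reverse d_row.reverse]
    simp only [List.length_reverse]
    rw [Nat.min_comm] at hn ⊢
    rw [← hn, hbr, hdr]
  rw [hzip, pvValsA_closed bs.reverse ds.reverse 0 (by simp [hbsl, hdsl])]
  apply List.ext_getElem
  · simp [hbsl]
  · intro k hk1 hk2
    simp only [List.length_reverse, List.length_map, List.length_range] at hk1 hk2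
    rw [List.getElem_reverse]
    simp only [List.getElem_map, List.getElem_range, List.length_map, List.length_range,
      List.length_reverse, hbsl]
    have hkn : k < n := hk2
    -- rewrite the four scan lookups
    rw [pvScan_getD _ ds 0 n (by omega), pvScan_getD _ ds 0 k (by omega),
        pvScan_getD _ bs 0 n (by omega), pvScan_getD _ bs 0 (k + 1) (by omega)]
    simp only [List.map_id', zero_add]
    -- the reversed-side index
    have hidx : n - 1 - k < bs.reverse.length := by simp [hbsl]; omega
    -- head: bs.reverse.getD (n-1-k) 0 = bs.getD k 0
    have hhead : bs.reverse.getD (n - 1 - k) 0 = bs.getD k 0 := by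
      rw [List.getD_eq_getElem _ _ hidx,
          List.getD_eq_getElem _ _ (by omega : k < bs.length)]
      rw [List.getElem_reverse]
      congr 1
      simp [hbsl]; omega
    -- d-sum: (ds.reverse.take (n-1-k+1)).sum = (ds.drop k).sum
    have hdsum : (ds.reverse.take (n - 1 - k + 1)).sum = (ds.drop k).sum := by
      rw [List.take_reverse, List.sum_reverse]
      have he : ds.length - (n - 1 - k + 1) = k := by rw [hdsl]; omega
      rw [he]
    -- b-count: (bs.reverse.take (n-1-k)).countP = (bs.drop (k+1)).countP
    have hbcnt : ((bs.reverse.take (n - 1 - k)).countP (fun x => x == 1))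
        = ((bs.drop (k + 1)).countP (fun x => x == 1)) := by
      rw [List.take_reverse, List.countP_reverse]
      have he : bs.length - (n - 1 - k) = k + 1 := by rw [hbsl]; omega
      rw [he]
    rw [hhead, hdsum, hbcnt]
    -- arithmetic: sums/counts over take n are over the whole list
    have htakeAllD : ds.take n = ds := by rw [← hdsl]; simp
    have htakeAllB : bs.take n = bs := by rw [← hbsl]; simp
    rw [htakeAllD, htakeAllB, pvIndSum, pvIndSum (bs.take (k + 1))]
    have h1 : ds.sum = (ds.take k).sum + (ds.drop k).sum := pvSumSplit ds k
    have h2 : (bs.countP (fun x => x == 1) : Int)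
        = ((bs.take (k + 1)).countP (fun x => x == 1) : Int)
          + ((bs.drop (k + 1)).countP (fun x => x == 1) : Int) := by
      rw [pvCountSplit bs (k + 1) (fun x => x == 1)]; push_cast; ring
    rw [h1, h2]
    ring

-- ===== VERDICT (by name: the statement is the Claim_ definition above) =====
theorem to_omega_row_spec : Claim_equal_to_omega_row := by
  intro b_row d_row _ _
  unfold Spec_to_omega_row to_omega_row to_omega_row_alt
  rw [pvFoldA]
  simp only [List.append_nil]
  rw [pvRows_eq b_row d_row]
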